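-- pv_equiv track=rewrite | github.com/mixdimmens/microtesty | microtesty/practice_functions.py | censor2
-- ===== SOURCE A (Python) =====
-- def censor2(text, word):
--   new_text=text
--   new_word = '*'*len(word)
--   i=0
--   while i<len(text)-len(word)+1:
--     print (text[i:i+len(word)])
--     if text[i:i+len(word)]==word:
--       new_text=new_text[:i]+new_word+new_text[i+len(word):len(text)] #assembles
--     i+=1
--   return new_text #shoot
-- ===== SOURCE B (Python) =====
-- def censor2(text, word):
--   n = len(text)
--   w = len(word)
--   censored = [False] * n
--   for i in range(n - w + 1):
--     print(text[i:i+w])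
--     if text[i:i+w] == word:
--       for j in range(i, i+w):
--         censored[j] = True
--   return ''.join('*' if censored[j] else text[j] for j in range(n))
-- ===== Notes on version B (the rewrite author's own statement) =====
-- stated objective: simpler
-- what changed: B replaces A's repeated slice-and-concatenate reassembly of the whole string at every match by a boolean mask marked per matched window and a single final join pass.
import Mathlib
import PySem

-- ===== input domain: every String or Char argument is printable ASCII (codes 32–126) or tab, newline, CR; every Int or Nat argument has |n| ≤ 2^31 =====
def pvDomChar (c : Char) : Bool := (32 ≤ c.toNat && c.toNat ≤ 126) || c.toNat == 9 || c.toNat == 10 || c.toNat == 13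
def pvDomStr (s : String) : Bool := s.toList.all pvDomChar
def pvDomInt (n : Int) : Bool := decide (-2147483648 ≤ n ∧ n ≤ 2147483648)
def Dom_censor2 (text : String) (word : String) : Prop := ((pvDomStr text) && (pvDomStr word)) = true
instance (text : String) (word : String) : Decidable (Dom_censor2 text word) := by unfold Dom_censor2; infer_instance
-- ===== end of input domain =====

-- B replaces A's incremental string reassembly by a boolean mask plus a single
-- final join; equivalence is about the RETURN value (both Pythons also print each
-- window, a side effect not modelled here).

-- ===== PORT A =====
-- A's while loop: rebuilds new_text by slice surgery at every match.
def censorA_loop (t c : List Char) (nt : List Char) (i : Nat) : List Char :=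
  if i < t.length + 1 - c.length then
    censorA_loop t c
      (if PySem.List.slice t (some (i : Int)) (some ((i + c.length : Nat) : Int)) == c then
        PySem.List.slice nt none (some (i : Int)) ++ List.replicate c.length '*' ++
          PySem.List.slice nt (some ((i + c.length : Nat) : Int)) (some ((t.length : Nat) : Int))
      else nt)
      (i + 1)
  else nt
termination_by t.length + 1 - c.length - i

def censor2 (text : String) (word : String) : String :=
  String.ofList (censorA_loop text.toList word.toList text.toList 0)

-- ===== PORT B =====
-- inner 'for j in range(i, i+w): censored[j] = True'
def censorB_mark (mask : List Bool) (i w : Nat) : List Bool :=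
  (List.range' i w).foldl (fun m j => m.set j true) mask

def censorB_loop (t c : List Char) (mask : List Bool) (i : Nat) : List Bool :=
  if i < t.length + 1 - c.length then
    censorB_loop t c
      (if PySem.List.slice t (some (i : Int)) (some ((i + c.length : Nat) : Int)) == c then
        censorB_mark mask i c.length
      else mask)
      (i + 1)
  else mask
termination_by t.length + 1 - c.length - i

def censor2_alt (text : String) (word : String) : String :=
  let t := text.toList
  let mask := censorB_loop t word.toList (List.replicate t.length false) 0
  String.ofList ((List.range t.length).map fun j => if mask.getD j false then '*' else t.getD j ' ')

-- ===== PRECONDITION & SPEC =====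
def Spec_censor2 (text : String) (word : String) (out : String) : Prop := out = censor2_alt text word
instance (text : String) (word : String) (out : String) : Decidable (Spec_censor2 text word out) := by unfold Spec_censor2; infer_instance

-- ===== CLAIM (what is proved, stated in full; the proofs are below) =====
def Claim_equal_censor2 : Prop := ∀ (text : String) (word : String), Dom_censor2 text word → Spec_censor2 text word (censor2 text word)

-- ===== LEMMAS AND PROOFS =====

-- position j is inside some matched window whose start is ≥ i
def Covered (t c : List Char) (i j : Nat) : Prop :=
  ∃ k, k < t.length + 1 - c.length ∧ i ≤ k ∧
    (PySem.List.slice t (some (k : Int)) (some ((k + c.length : Nat) : Int)) == c) = true ∧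
    k ≤ j ∧ j < k + c.length

lemma covered_step (t c : List Char) (i j : Nat) (hi : i < t.length + 1 - c.length) :
    Covered t c i j ↔
      ((PySem.List.slice t (some (i : Int)) (some ((i + c.length : Nat) : Int)) == c) = true
        ∧ i ≤ j ∧ j < i + c.length) ∨ Covered t c (i + 1) j := by
  constructor
  · rintro ⟨k, hk1, hk2, hk3, hk4, hk5⟩
    rcases Nat.eq_or_lt_of_le hk2 with h | h
    · exact Or.inl (h ▸ ⟨hk3, hk4, hk5⟩)
    · exact Or.inr ⟨k, hk1, h, hk3, hk4, hk5⟩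
  · rintro (⟨h1, h2, h3⟩ | ⟨k, hk1, hk2, hk3, hk4, hk5⟩)
    · exact ⟨i, hi, le_refl i, h1, h2, h3⟩
    · exact ⟨k, hk1, by omega, hk3, hk4, hk5⟩

lemma covered_stop (t c : List Char) (i j : Nat) (hi : ¬ i < t.length + 1 - c.length) :
    ¬ Covered t c i j := by
  rintro ⟨k, hk1, hk2, _⟩; omega

-- characterisation of A's slice-surgery update
lemma update_get (t c nt : List Char) (i j : Nat) (hn : nt.length = t.length)
    (hi : i < t.length + 1 - c.length) :
    (PySem.List.slice nt none (some (i : Int)) ++ List.replicate c.length '*' ++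
      PySem.List.slice nt (some ((i + c.length : Nat) : Int)) (some ((t.length : Nat) : Int)))[j]?
    = if i ≤ j ∧ j < i + c.length then some '*' else nt[j]? := by
  rw [PySem.List.slice_to_natCast, PySem.List.slice_natCast]
  have hti : (nt.take i).length = i := by simp; omega
  have htr : (nt.take i ++ List.replicate c.length '*').length = i + c.length := by
    simp [hti]
  rcases Nat.lt_or_ge j i with h | h
  · rw [if_neg (by omega), List.getElem?_append_left (by omega),
      List.getElem?_append_left (by omega), List.getElem?_take_of_lt h]
  · rcases Nat.lt_or_ge j (i + c.length) with h2 | h2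
    · rw [if_pos ⟨h, h2⟩, List.getElem?_append_left (by omega),
        List.getElem?_append_right (by omega), hti, List.getElem?_replicate,
        if_pos (by omega)]
    · rw [if_neg (by omega), List.getElem?_append_right (by omega), htr]
      rcases Nat.lt_or_ge j nt.length with h3 | h3
      · rw [List.getElem?_take_of_lt (by omega), List.getElem?_drop]
        congr 1; omega
      · rw [List.getElem?_eq_none (by simp; omega), List.getElem?_eq_none (by omega)]

lemma update_length (t c nt : List Char) (i : Nat) (hn : nt.length = t.length)
    (hi : i < t.length + 1 - c.length) :
    (PySem.List.slice nt none (some (i : Int)) ++ List.replicate c.length '*' ++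
      PySem.List.slice nt (some ((i + c.length : Nat) : Int)) (some ((t.length : Nat) : Int))).length
    = nt.length := by
  rw [PySem.List.slice_to_natCast, PySem.List.slice_natCast]
  simp; omega

lemma loopA_get (t c : List Char) (m : Nat) : ∀ i nt, m = t.length + 1 - c.length - i →
    nt.length = t.length → ∀ j : Nat,
    (Covered t c i j → (censorA_loop t c nt i)[j]? = some '*') ∧
    (¬ Covered t c i j → (censorA_loop t c nt i)[j]? = nt[j]?) := by
  induction m with
  | zero =>
    intro i nt hm hn j
    unfold censorA_loop
    rw [if_neg (by omega)]
    exact ⟨fun hc => absurd hc (covered_stop t c i j (by omega)), fun _ => rfl⟩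
  | succ m ih =>
    intro i nt hm hn j
    unfold censorA_loop
    rw [if_pos (by omega)]
    have hstep := covered_step t c i j (by omega)
    split
    case isTrue hmatch =>
      have IH := ih (i + 1)
        (PySem.List.slice nt none (some (i : Int)) ++ List.replicate c.length '*' ++
          PySem.List.slice nt (some ((i + c.length : Nat) : Int)) (some ((t.length : Nat) : Int)))
        (by omega) (by rw [update_length t c nt i hn (by omega)]; exact hn) j
      constructor
      · intro hc
        rcases hstep.mp hc with ⟨_, h2, h3⟩ | hc'
        · by_cases hC : Covered t c (i + 1) j
          · exact IH.1 hC
          · rw [IH.2 hC, update_get t c nt i j hn (by omega), if_pos ⟨h2, h3⟩]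
        · exact IH.1 hc'
      · intro hc
        have h1 : ¬ Covered t c (i + 1) j := fun h => hc (hstep.mpr (Or.inr h))
        have h2 : ¬ (i ≤ j ∧ j < i + c.length) := fun h => hc (hstep.mpr (Or.inl ⟨hmatch, h⟩))
        rw [IH.2 h1, update_get t c nt i j hn (by omega), if_neg h2]
    case isFalse hmatch =>
      have IH := ih (i + 1) nt (by omega) hn j
      constructor
      · intro hc
        rcases hstep.mp hc with ⟨h1, _⟩ | hc'
        · exact absurd h1 hmatch
        · exact IH.1 hc'
      · intro hc
        exact IH.2 fun h => hc (hstep.mpr (Or.inr h))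

lemma mark_length (mask : List Bool) (i w : Nat) :
    (censorB_mark mask i w).length = mask.length := by
  induction w generalizing i mask with
  | zero => simp [censorB_mark]
  | succ w ih =>
    rw [censorB_mark, List.range'_succ, List.foldl_cons]
    rw [show ((List.range' (i+1) w).foldl (fun m j => m.set j true) (mask.set i true))
        = censorB_mark (mask.set i true) (i+1) w from rfl]
    rw [ih]; simp

lemma mark_get (mask : List Bool) (i w j : Nat) :
    (censorB_mark mask i w)[j]? =
      if i ≤ j ∧ j < i + w ∧ j < mask.length then some true else mask[j]? := by
  induction w generalizing i mask with
  | zero =>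
    rw [censorB_mark]
    simp only [List.range'_zero, List.foldl_nil]
    rw [if_neg (by omega)]
  | succ w ih =>
    rw [censorB_mark, List.range'_succ, List.foldl_cons]
    rw [show ((List.range' (i+1) w).foldl (fun m j => m.set j true) (mask.set i true))
        = censorB_mark (mask.set i true) (i+1) w from rfl]
    rw [ih]
    rw [List.length_set]
    by_cases hij : i = j
    · subst hij
      rw [if_neg (by omega)]
      by_cases hlen : i < mask.length
      · rw [if_pos ⟨le_refl i, by omega, hlen⟩, List.getElem?_set_eq_of_lt true hlen]
      · rw [if_neg (by omega), List.getElem?_eq_none (by simp; omega),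
          List.getElem?_eq_none (by omega)]
    · rw [List.getElem?_set_ne hij]
      by_cases h1 : i + 1 ≤ j ∧ j < i + 1 + w ∧ j < mask.length
      · rw [if_pos h1, if_pos (by omega)]
      · rw [if_neg h1, if_neg (by omega)]

lemma loopB_get (t c : List Char) (m : Nat) : ∀ i mask, m = t.length + 1 - c.length - i →
    mask.length = t.length → ∀ j : Nat,
    (Covered t c i j → (censorB_loop t c mask i)[j]? = some true) ∧
    (¬ Covered t c i j → (censorB_loop t c mask i)[j]? = mask[j]?) := by
  induction m with
  | zero =>
    intro i mask hm hn j
    unfold censorB_loop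
    rw [if_neg (by omega)]
    exact ⟨fun hc => absurd hc (covered_stop t c i j (by omega)), fun _ => rfl⟩
  | succ m ih =>
    intro i mask hm hn j
    unfold censorB_loop
    rw [if_pos (by omega)]
    have hstep := covered_step t c i j (by omega)
    split
    case isTrue hmatch =>
      have IH := ih (i + 1) (censorB_mark mask i c.length)
        (by omega) (by rw [mark_length]; exact hn) j
      constructor
      · intro hc
        rcases hstep.mp hc with ⟨_, h2, h3⟩ | hc'
        · by_cases hC : Covered t c (i + 1) j
          · exact IH.1 hC
          · rw [IH.2 hC, mark_get mask i c.length j, if_pos ⟨h2, h3, by omega⟩]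
        · exact IH.1 hc'
      · intro hc
        have h1 : ¬ Covered t c (i + 1) j := fun h => hc (hstep.mpr (Or.inr h))
        have h2 : ¬ (i ≤ j ∧ j < i + c.length ∧ j < mask.length) := fun h =>
          hc (hstep.mpr (Or.inl ⟨hmatch, h.1, h.2.1⟩))
        rw [IH.2 h1, mark_get mask i c.length j, if_neg h2]
    case isFalse hmatch =>
      have IH := ih (i + 1) mask (by omega) hn j
      constructor
      · intro hc
        rcases hstep.mp hc with ⟨h1, _⟩ | hc'
        · exact absurd h1 hmatch
        · exact IH.1 hc'
      · intro hc
        exact IH.2 fun h => hc (hstep.mpr (Or.inr h))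

-- ===== VERDICT (by name: the statement is the Claim_ definition above) =====
theorem censor2_spec : Claim_equal_censor2 := by
  intro text word _
  unfold Spec_censor2 censor2 censor2_alt
  set t := text.toList with ht
  set c := word.toList with hc
  congr 1
  apply List.ext_getElem?
  intro j
  have hA := loopA_get t c (t.length + 1 - c.length - 0) 0 t rfl rfl j
  have hB := loopB_get t c (t.length + 1 - c.length - 0) 0 (List.replicate t.length false)
    rfl (by simp) j
  rcases Nat.lt_or_ge j t.length with hj | hj
  · rw [List.getElem?_map, List.getElem?_range hj]
    simp only [Option.map_some]
    by_cases hcov : Covered t c 0 j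
    · rw [hA.1 hcov]
      have : (censorB_loop t c (List.replicate t.length false) 0).getD j false = true := by
        rw [List.getD_eq_getElem?_getD, hB.1 hcov]; rfl
      rw [this, if_pos rfl]
    · rw [hA.2 hcov]
      have : (censorB_loop t c (List.replicate t.length false) 0).getD j false = false := by
        rw [List.getD_eq_getElem?_getD, hB.2 hcov, List.getElem?_replicate, if_pos hj]; rfl
      rw [this]
      simp only [Bool.false_eq_true, if_false]
      rw [List.getD_eq_getElem?_getD, List.getElem?_eq_getElem hj]; rfl
  · have hcov : ¬ Covered t c 0 j := by rintro ⟨k, hk1, _, _, _, hk5⟩; omega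
    rw [hA.2 hcov, List.getElem?_eq_none (l := t) (by omega),
      List.getElem?_eq_none (by rw [List.length_map, List.length_range]; omega)]
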